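-- pv_equiv track=rewrite | github.com/ArchQuant/usaco-solutions | atcoder-B413/e.reverse_2exp/min_lex.py | min_lex
-- ===== SOURCE A (Python) =====
-- def min_lex(p):
--     n = len(p)
--     if n == 1:
--         return p
--     mid = n // 2
--     left = min_lex(p[:mid])
--     right = min_lex(p[mid:])
--     opt1 = left + right
--     opt2 = right + left
--     return min(opt1, opt2)
-- ===== SOURCE B (Python) =====
-- def min_lex(p):
--     stack = [p]
--     out = []
--     while stack:
--         item = stack.pop()
--         if item is None:
--             r = out.pop()
--             l = out.pop()
--             out.append(min(l + r, r + l))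
--         elif len(item) == 1:
--             out.append(item)
--         else:
--             mid = len(item) // 2
--             stack.append(None)
--             stack.append(item[mid:])
--             stack.append(item[:mid])
--     return out[-1]
-- ===== Notes on version B (the rewrite author's own statement) =====
-- stated objective: alternative
-- what changed: The recursive half-split is replaced by an explicit-stack post-order worklist that splits segments top-down and combines finished children bottom-up with min(l+r, r+l); Pre_ excludes the empty list, on which A recurses forever (RecursionError).
import Mathlib
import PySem

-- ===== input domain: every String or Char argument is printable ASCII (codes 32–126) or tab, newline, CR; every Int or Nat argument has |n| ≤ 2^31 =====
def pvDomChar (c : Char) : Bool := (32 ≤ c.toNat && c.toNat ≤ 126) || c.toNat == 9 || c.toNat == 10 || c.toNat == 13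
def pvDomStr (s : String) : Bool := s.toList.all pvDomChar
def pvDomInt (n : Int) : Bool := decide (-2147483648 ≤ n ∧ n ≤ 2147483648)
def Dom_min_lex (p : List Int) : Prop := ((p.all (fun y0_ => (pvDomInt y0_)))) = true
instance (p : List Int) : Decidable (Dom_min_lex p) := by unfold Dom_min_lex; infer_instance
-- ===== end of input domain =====

-- Alternative decomposition: A's recursion is replaced in B by an explicit-stack
-- post-order worklist over the same half-split tree; same return value on every
-- nonempty list (A never returns on [] — infinite recursion).


-- Python's list `<=` (lexicographic), used by builtin min(a, b) in both programs
def pyLexLe : List Int → List Int → Bool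
  | [], _ => true
  | _ :: _, [] => false
  | a :: as, b :: bs => if a < b then true else if b < a then false else pyLexLe as bs

-- Python's min(a, b): first argument on ties
def pyMin2 (a b : List Int) : List Int := if pyLexLe a b then a else b

-- ===== PORT A =====
-- fuel makes the recursion total; p.length fuel is enough for every nonempty p
def minLexFuel : Nat → List Int → List Int
  | 0, p => p
  | fuel + 1, p =>
    let n : Int := PySem.List.len p
    if n == 1 then p
    else
      let mid := PySem.Int.floordiv n 2
      let left := minLexFuel fuel (PySem.List.slice p none (some mid))
      let right := minLexFuel fuel (PySem.List.slice p (some mid) none)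
      pyMin2 (left ++ right) (right ++ left)

def min_lex (p : List Int) : List Int := minLexFuel p.length p

-- ===== PORT B =====
-- stack/out are Python lists used as stacks (push/pop at the end); here the list
-- head is the stack top.  none is Python's None combine marker.  Fuel makes the
-- while-loop total; 3*len iterations are enough for every nonempty input.
def minLexLoop : Nat → List (Option (List Int)) → List (List Int) → List (List Int)
  | 0, _, out => out
  | _ + 1, [], out => out
  | fuel + 1, item :: stack, out =>
    match item with
    | none =>
      match out with
      | r :: l :: rest => minLexLoop fuel stack (pyMin2 (l ++ r) (r ++ l) :: rest)
      | _ => out      -- Python: out.pop() would raise IndexError; never reached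
    | some seg =>
      if seg.length == 1 then
        minLexLoop fuel stack (seg :: out)
      else
        let mid := seg.length / 2
        minLexLoop fuel (some (seg.take mid) :: some (seg.drop mid) :: none :: stack) out

def min_lex_alt (p : List Int) : List Int :=
  (minLexLoop (3 * p.length) [some p] []).headD []   -- out[-1] = head (top of out)

-- ===== PRECONDITION & SPEC =====
-- A recurses forever (RecursionError) on the empty list: excluded.
def Pre_min_lex (p : List Int) : Prop := p ≠ []
instance (p : List Int) : Decidable (Pre_min_lex p) := by unfold Pre_min_lex; infer_instance
def pvWitness_min_lex : List Int := [2, 1]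

def Spec_min_lex (p : List Int) (out : List Int) : Prop := out = min_lex_alt p
instance (p : List Int) (out : List Int) : Decidable (Spec_min_lex p out) := by unfold Spec_min_lex; infer_instance

-- ===== CLAIM (what is proved, stated in full; the proofs are below) =====
def Claim_equal_min_lex : Prop := ∀ (p : List Int), Dom_min_lex p → Pre_min_lex p → Spec_min_lex p (min_lex p)

-- ===== LEMMAS AND PROOFS =====

-- unfolding minLexFuel on a singleton
theorem minLexFuel_one (f : Nat) (p : List Int) (h : p.length = 1) :
    minLexFuel (f + 1) p = p := by
  simp [minLexFuel, PySem.List.len_eq, h]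

-- unfolding minLexFuel when length ≥ 2, in take/drop form
theorem minLexFuel_step (f : Nat) (p : List Int) (h : 2 ≤ p.length) :
    minLexFuel (f + 1) p =
      pyMin2 (minLexFuel f (p.take (p.length / 2)) ++ minLexFuel f (p.drop (p.length / 2)))
             (minLexFuel f (p.drop (p.length / 2)) ++ minLexFuel f (p.take (p.length / 2))) := by
  have hne1 : (PySem.List.len p == (1 : Int)) = false := by
    simp [PySem.List.len_eq]; omega
  have h2 : PySem.Int.floordiv (PySem.List.len p) 2 = ((p.length / 2 : Nat) : Int) := by
    rw [PySem.List.len_eq, PySem.Int.floordiv_eq_ediv_of_pos (by omega)]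
    exact_mod_cast (Int.natCast_div p.length 2).symm
  simp only [minLexFuel, hne1, Bool.false_eq_true, if_false, h2,
    PySem.List.slice_to_natCast, PySem.List.slice_from_natCast]

-- the fuel is irrelevant once it is at least the length (nonempty p)
theorem minLexFuel_fuel (n : Nat) : ∀ (p : List Int) (f₁ f₂ : Nat), p.length = n → p ≠ [] →
    p.length ≤ f₁ → p.length ≤ f₂ → minLexFuel f₁ p = minLexFuel f₂ p := by
  induction n using Nat.strong_induction_on with
  | _ n ih =>
    intro p f₁ f₂ hn hne h1 h2
    have hpos : 1 ≤ p.length := List.length_pos_of_ne_nil hne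
    obtain ⟨g₁, rfl⟩ : ∃ g, f₁ = g + 1 := ⟨f₁ - 1, by omega⟩
    obtain ⟨g₂, rfl⟩ : ∃ g, f₂ = g + 1 := ⟨f₂ - 1, by omega⟩
    by_cases hone : p.length = 1
    · rw [minLexFuel_one _ _ hone, minLexFuel_one _ _ hone]
    · have h2le : 2 ≤ p.length := by omega
      have ha : (p.take (p.length / 2)).length = p.length / 2 := by
        simp; omega
      have hb : (p.drop (p.length / 2)).length = p.length - p.length / 2 := by simp
      have hul : minLexFuel g₁ (p.take (p.length / 2)) = minLexFuel g₂ (p.take (p.length / 2)) := by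
        apply ih (p.length / 2) (by omega) _ _ _ ha
        · intro hc; rw [hc] at ha; simp at ha; omega
        · omega
        · omega
      have hur : minLexFuel g₁ (p.drop (p.length / 2)) = minLexFuel g₂ (p.drop (p.length / 2)) := by
        apply ih (p.length - p.length / 2) (by omega) _ _ _ hb
        · intro hc; rw [hc] at hb; simp at hb; omega
        · omega
        · omega
      rw [minLexFuel_step _ _ h2le, minLexFuel_step _ _ h2le, hul, hur]

-- the loop consumes exactly 3·len−2 fuel on one segment, leaving A's answer on top of out
theorem minLexLoop_seg (n : Nat) : ∀ (seg : List Int), seg.length = n → seg ≠ [] →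
    ∀ (k : Nat) (stack : List (Option (List Int))) (out : List (List Int)),
    minLexLoop (3 * n - 2 + k) (some seg :: stack) out =
      minLexLoop k stack (minLexFuel seg.length seg :: out) := by
  induction n using Nat.strong_induction_on with
  | _ n ih =>
    intro seg hn hne k stack out
    have hpos : 1 ≤ seg.length := List.length_pos_of_ne_nil hne
    by_cases hone : seg.length = 1
    · have : 3 * n - 2 + k = k + 1 := by omega
      rw [this]
      have hbeq : (seg.length == 1) = true := by simp [hone]
      simp only [minLexLoop, hbeq, if_true]
      have hfs : minLexFuel seg.length seg = seg := by
        rw [hone]; exact minLexFuel_one 0 seg hone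
      rw [hfs]
    · have h2le : 2 ≤ seg.length := by omega
      set a := seg.length / 2 with hadef
      have ha : (seg.take a).length = a := by simp [hadef]; omega
      have hb : (seg.drop a).length = seg.length - a := by simp
      have hane : seg.take a ≠ [] := by
        intro hc; rw [hc] at ha; simp at ha; omega
      have hbne : seg.drop a ≠ [] := by
        intro hc; rw [hc] at hb; simp at hb; omega
      have hfuel : 3 * n - 2 + k =
          (3 * (seg.take a).length - 2 + (3 * (seg.drop a).length - 2 + (1 + k))) + 1 := by
        rw [ha, hb]; omega
      have hbeq : (seg.length == 1) = false := by simp; omega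
      rw [hfuel]
      simp only [minLexLoop, hbeq, Bool.false_eq_true, if_false]
      rw [ih (seg.take a).length (by rw [ha]; omega) _ rfl hane]
      rw [ih (seg.drop a).length (by rw [hb]; omega) _ rfl hbne]
      -- now one combine iteration
      have : minLexLoop (1 + k) (none :: stack)
            (minLexFuel (seg.drop a).length (seg.drop a) ::
              minLexFuel (seg.take a).length (seg.take a) :: out) =
          minLexLoop k stack
            (pyMin2 (minLexFuel (seg.take a).length (seg.take a) ++ minLexFuel (seg.drop a).length (seg.drop a))
                    (minLexFuel (seg.drop a).length (seg.drop a) ++ minLexFuel (seg.take a).length (seg.take a)) :: out) := by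
        have h1k : 1 + k = k + 1 := by omega
        rw [h1k]
        simp only [minLexLoop]
      rw [this]
      congr 1
      obtain ⟨m, hm⟩ : ∃ m, seg.length = m + 1 := ⟨seg.length - 1, by omega⟩
      rw [hm, minLexFuel_step m seg (by omega)]
      have hl : minLexFuel m (seg.take (seg.length / 2)) = minLexFuel (seg.take a).length (seg.take a) := by
        rw [← hadef]
        exact minLexFuel_fuel (seg.take a).length _ _ _ rfl hane (by rw [ha]; omega) le_rfl
      have hr : minLexFuel m (seg.drop (seg.length / 2)) = minLexFuel (seg.drop a).length (seg.drop a) := by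
        rw [← hadef]
        exact minLexFuel_fuel (seg.drop a).length _ _ _ rfl hbne (by rw [hb]; omega) le_rfl
      rw [hl, hr]

-- ===== VERDICT (by name: the statement is the Claim_ definition above) =====
theorem min_lex_spec : Claim_equal_min_lex := by
  intro p _ hpre
  have hpos : 1 ≤ p.length := List.length_pos_of_ne_nil hpre
  unfold Spec_min_lex min_lex min_lex_alt
  have hfuel : 3 * p.length = 3 * p.length - 2 + 2 := by omega
  rw [hfuel, minLexLoop_seg p.length p rfl hpre 2 [] []]
  simp [minLexLoop]
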